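-- pv_equiv track=rewrite | github.com/TrellixVulnTeam/DiveIntoDeepLearning_LUWL | d2l-en/d2l/d2l.py | preprocess_nmt
-- ===== SOURCE A (Python) =====
-- def preprocess_nmt(text):
--     text = text.replace('\u202f', ' ').replace('\xa0', ' ')
--
--     def no_space(char, prev_char):
--         return (True if char in (',', '!', '.')
--                 and prev_char != ' ' else False)
--
--     out = [' '+char if i > 0 and no_space(char, text[i-1]) else char
--            for i, char in enumerate(text.lower())]
--     return ''.join(out)
-- ===== SOURCE B (Python) =====
-- def preprocess_nmt(text):
--     text = text.replace('\u202f', ' ').replace('\xa0', ' ')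
--     t = text.lower()
--     return ' '.join(
--         w[:1] + w[1:].replace(',', ' ,').replace('.', ' .').replace('!', ' !')
--         for w in t.split(' '))
-- ===== Notes on version B (the rewrite author's own statement) =====
-- stated objective: faster
-- what changed: Instead of a character-by-character scan tracking the previous character, B splits the lowered text on single spaces (so punctuation needs a space exactly when it is not the first character of its token), rewrites each token's tail with three global str.replace calls, and rejoins; the per-character Python loop disappears in favour of C-implemented bulk string operations.
import Mathlib
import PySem

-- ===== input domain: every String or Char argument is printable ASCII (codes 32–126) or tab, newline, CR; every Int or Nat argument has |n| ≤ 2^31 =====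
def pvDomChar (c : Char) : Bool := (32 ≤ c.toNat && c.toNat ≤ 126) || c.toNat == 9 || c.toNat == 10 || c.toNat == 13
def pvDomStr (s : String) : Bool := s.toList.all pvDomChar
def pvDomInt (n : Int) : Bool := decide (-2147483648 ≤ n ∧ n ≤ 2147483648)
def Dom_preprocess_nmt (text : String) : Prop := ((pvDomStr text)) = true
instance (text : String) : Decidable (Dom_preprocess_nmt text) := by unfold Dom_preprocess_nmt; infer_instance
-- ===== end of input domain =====

-- B replaces A's per-character scan (with its previous-character test) by splitting the
-- lowered text on single spaces, rewriting each token's tail with global replaces, and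
-- rejoining (objective: faster by bulk string operations; same value on every input).

-- ===== PORT A =====
-- helper no_space(char, prev_char) of A
def pvNoSpace (ch : Char) (prev : Char) : Bool :=
  if (ch = ',' ∨ ch = '!' ∨ ch = '.') ∧ prev ≠ ' ' then true else false

def preprocess_nmt (text : String) : String :=
  let text := PySem.Str.replace (PySem.Str.replace text "\u202F" " ") "\u00A0" " "
  -- text[i-1]: the 'i > 0' guard makes the index always in range, so pyGetD's
  -- default ' ' is never used (exact where Python returns)
  let out : List (List Char) :=
    (PySem.List.enumerate (PySem.Str.lower text).toList).map (fun p =>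
      if 0 < p.1 ∧ pvNoSpace p.2 (PySem.List.pyGetD text.toList (p.1 - 1) ' ') = true
      then [' ', p.2] else [p.2])
  String.ofList out.flatten

-- ===== PORT B =====
-- Source B: split on ' ' (t.split(' ') keeps empty tokens: Chars.splitOn is that form),
-- per token w: w[:1] + w[1:].replace(',', ' ,').replace('.', ' .').replace('!', ' !'),
-- then ' '.join (all exact on code points)
def preprocess_nmt_alt (text : String) : String :=
  let text := PySem.Str.replace (PySem.Str.replace text "\u202F" " ") "\u00A0" " "
  let t := (PySem.Str.lower text).toList
  let pieces : List (List Char) :=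
    (PySem.Chars.splitOn t [' ']).map (fun w =>
      PySem.List.slice w none (some 1) ++
      PySem.Chars.replace
        (PySem.Chars.replace
          (PySem.Chars.replace (PySem.List.slice w (some 1) none) [','] [' ', ','])
          ['.'] [' ', '.'])
        ['!'] [' ', '!'])
  String.ofList (PySem.Chars.join [' '] pieces)

-- ===== PRECONDITION & SPEC =====
def Spec_preprocess_nmt (text : String) (out : String) : Prop := out = preprocess_nmt_alt text
instance (text : String) (out : String) : Decidable (Spec_preprocess_nmt text out) := by unfold Spec_preprocess_nmt; infer_instance

-- ===== CLAIM (what is proved, stated in full; the proofs are below) =====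
def Claim_equal_preprocess_nmt : Prop := ∀ (text : String), Dom_preprocess_nmt text → Spec_preprocess_nmt text (preprocess_nmt text)

-- ===== LEMMAS AND PROOFS =====

-- proof-side spec functions: pvF/pvG is the obvious prev-tracking recursion,
-- pvS the split on ' ', pvHp the per-character token rewriting
def pvHp (c : Char) : List Char :=
  if c = ',' ∨ c = '.' ∨ c = '!' then [' ', c] else [c]

def pvG : Char → List Char → List Char
  | _, [] => []
  | p, c :: l => (if (c = ',' ∨ c = '.' ∨ c = '!') ∧ p ≠ ' ' then [' ', c] else [c]) ++ pvG c l

def pvF : List Char → List Char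
  | [] => []
  | a :: l => a :: pvG a l

def pvS : List Char → List (List Char)
  | [] => [[]]
  | c :: l => if c = ' ' then [] :: pvS l else (pvS l).modifyHead (c :: ·)

def pvTok (w : List Char) : List Char := w.take 1 ++ (w.drop 1).flatMap pvHp

def pvK (ws : List (List Char)) : List Char := ws.flatMap (fun w => ' ' :: pvTok w)

-- lowering a character yields a space exactly when the character is a space
lemma pv_lowerChar_eq_space_iff (c : Char) : PySem.Chars.lowerChar c = ' ' ↔ c = ' ' := by
  unfold PySem.Chars.lowerChar PySem.Chars.isupper
  split
  · rename_i h
    simp only [Bool.and_eq_true, decide_eq_true_eq, Char.le_def] at h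
    have hv1 : 65 ≤ c.val.toNat := by exact_mod_cast UInt32.le_iff_toNat_le.mp h.1
    have hv2 : c.val.toNat ≤ 90 := by exact_mod_cast UInt32.le_iff_toNat_le.mp h.2
    have htn : c.toNat = c.val.toNat := rfl
    constructor
    · intro hc
      exfalso
      have hvalid : (c.toNat + 32).isValidChar := Or.inl (by omega)
      have hval : (Char.ofNat (c.toNat + 32)).toNat = c.toNat + 32 := by
        rw [Char.ofNat, dif_pos hvalid]
        simp only [Char.ofNatAux, Char.toNat, UInt32.toNat]
        simp
      rw [hc] at hval
      have hsp : (' ' : Char).toNat = 32 := rfl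
      omega
    · intro hc
      subst hc
      exact absurd hv1 (by decide)
  · exact Iff.rfl

-- A's helper as a proposition
lemma pvNoSpace_iff (ch prev : Char) :
    pvNoSpace ch prev = true ↔ ((ch = ',' ∨ ch = '!' ∨ ch = '.') ∧ prev ≠ ' ') := by
  unfold pvNoSpace
  split <;> simp_all

-- A's joined pieces written pairwise: the first lowered char, then each lowered char
-- guarded by its (unlowered) predecessor
lemma pv_core (l : List Char) :
    ((PySem.List.enumerate (PySem.Chars.lower l)).map (fun p =>
        if 0 < p.1 ∧ pvNoSpace p.2 (PySem.List.pyGetD l (p.1 - 1) ' ') = true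
        then [' ', p.2] else [p.2])).flatten
    = (((PySem.Chars.lower l).take 1) ::
        ((PySem.Chars.lower l).zip ((PySem.Chars.lower l).drop 1)).map (fun pc =>
          (if (pc.2 = ',' ∨ pc.2 = '.' ∨ pc.2 = '!') ∧ pc.1 ≠ ' ' then [' '] else []) ++ [pc.2])).flatten := by
  cases l with
  | nil => simp [PySem.Chars.lower]
  | cons a l' =>
    have hlen : (PySem.Chars.lower (a :: l')).length = l'.length + 1 := by
      simp [PySem.Chars.lower]
    have hLj : ∀ (i : Nat) (hi : i < l'.length + 1),
        (PySem.Chars.lower (a :: l'))[i]'(by omega)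
          = PySem.Chars.lowerChar ((a :: l')[i]'(by simpa using hi)) := by
      intro i hi
      cases i with
      | zero => simp [PySem.Chars.lower]
      | succ n => simp [PySem.Chars.lower]
    congr 1
    apply List.ext_getElem
    · simp [PySem.List.length_enumerate, List.length_zip, hlen]
    · intro k h1 h2
      simp only [List.length_map, PySem.List.length_enumerate] at h1
      simp only [List.getElem_map,
        PySem.List.getElem_enumerate _ 0 k (by simpa [PySem.List.length_enumerate] using h1)]
      cases k with
      | zero =>
        have hc : ¬ ((0:Int) < 0 + ((0:Nat):Int) ∧
            pvNoSpace ((PySem.Chars.lower (a :: l'))[0]'(by omega))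
              (PySem.List.pyGetD (a :: l') (0 + ((0:Nat):Int) - 1) ' ') = true) := by
          simp
        rw [if_neg hc]
        simp [PySem.Chars.lower]
      | succ j =>
        have hj : j + 1 < l'.length + 1 := hlen ▸ h1
        have hcast : ((0:Int) + (↑(j+1)) - 1) = ((j : Nat) : Int) := by push_cast; ring
        rw [hcast, PySem.List.pyGetD_natCast]
        have hjlt : j < (a :: l').length := by simp; omega
        have hgetD : (a :: l').getD j ' ' = (a :: l')[j] := List.getD_eq_getElem _ _ hjlt
        have hz : ((PySem.Chars.lower (a :: l')).zip ((PySem.Chars.lower (a :: l')).drop 1))[j]'(by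
              simp [List.length_zip, hlen]; omega)
            = ((PySem.Chars.lower (a :: l'))[j]'(by omega),
               (PySem.Chars.lower (a :: l'))[j+1]'(by omega)) := by
          rw [List.getElem_zip]
          congr 1
        simp only [List.getElem_cons_succ, List.getElem_map, hz]
        have hsp : ((a :: l')[j]'(by simpa using hjlt) = ' ')
            ↔ ((PySem.Chars.lower (a :: l'))[j]'(by omega) = ' ') := by
          rw [hLj j (by omega)]
          exact (pv_lowerChar_eq_space_iff _).symm
        rw [hgetD]
        have hcond : ((0:Int) < 0 + (↑(j+1):Int) ∧
            pvNoSpace ((PySem.Chars.lower (a :: l'))[j+1]'(by omega)) ((a :: l')[j]) = true)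
            ↔ (((PySem.Chars.lower (a :: l'))[j+1]'(by omega) = ','
                ∨ (PySem.Chars.lower (a :: l'))[j+1]'(by omega) = '.'
                ∨ (PySem.Chars.lower (a :: l'))[j+1]'(by omega) = '!')
               ∧ (PySem.Chars.lower (a :: l'))[j]'(by omega) ≠ ' ') := by
          rw [pvNoSpace_iff]
          constructor
          · rintro ⟨-, hp, hne⟩
            exact ⟨by tauto, fun h => hne (hsp.mpr h)⟩
          · rintro ⟨hp, hne⟩
            refine ⟨by omega, by tauto, fun h => hne (hsp.mp h)⟩
        by_cases hcase : ((PySem.Chars.lower (a :: l'))[j+1]'(by omega) = ','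
            ∨ (PySem.Chars.lower (a :: l'))[j+1]'(by omega) = '.'
            ∨ (PySem.Chars.lower (a :: l'))[j+1]'(by omega) = '!')
            ∧ (PySem.Chars.lower (a :: l'))[j]'(by omega) ≠ ' '
        · rw [if_pos (hcond.mpr hcase), if_pos hcase]; rfl
        · rw [if_neg (fun h => hcase (hcond.mp h)), if_neg hcase]; rfl

-- the pairwise form is the prev-tracking recursion pvF
lemma pv_zip_eq_G (a : Char) (l : List Char) :
    (((a :: l).zip l).map (fun pc : Char × Char =>
        (if (pc.2 = ',' ∨ pc.2 = '.' ∨ pc.2 = '!') ∧ pc.1 ≠ ' ' then [' '] else []) ++ [pc.2])).flatten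
      = pvG a l := by
  induction l generalizing a with
  | nil => simp [pvG]
  | cons c l' ih =>
    simp only [List.zip_cons_cons, List.map_cons, List.flatten_cons, ih c, pvG]
    by_cases h : (c = ',' ∨ c = '.' ∨ c = '!') ∧ a ≠ ' '
    · rw [if_pos h, if_pos h]; rfl
    · rw [if_neg h, if_neg h]; rfl

-- single-character replace is a flatMap
lemma pv_replace_go_single (p : Char) (new : List Char) :
    ∀ (l : List Char) (fuel : Nat) (acc : List Char), l.length ≤ fuel →
      PySem.Chars.replace.go [p] new fuel l acc
        = acc.reverse ++ l.flatMap (fun c => if c = p then new else [c]) := by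
  intro l
  induction l with
  | nil =>
    intro fuel acc _
    cases fuel <;> simp [PySem.Chars.replace.go]
  | cons c rest ih =>
    intro fuel acc hf
    cases fuel with
    | zero => simp at hf
    | succ f =>
      by_cases hc : c = p
      · subst hc
        have hpre : [c].isPrefixOf (c :: rest) = true := by simp [List.isPrefixOf]
        simp only [PySem.Chars.replace.go, hpre, if_true, List.length_cons,
          List.length_nil, Nat.zero_add, List.drop_succ_cons, List.drop_zero]
        rw [ih f (new.reverse ++ acc) (by simp at hf; omega)]
        simp [List.flatMap_cons]
      · have hpre : [p].isPrefixOf (c :: rest) = false := by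
          simp [List.isPrefixOf]
          exact fun h => hc h.symm
        simp only [PySem.Chars.replace.go, hpre, Bool.false_eq_true, if_false]
        rw [ih f (c :: acc) (by simp at hf; omega)]
        simp [List.flatMap_cons, hc]

lemma pv_replace_single (p : Char) (new l : List Char) :
    PySem.Chars.replace l [p] new = l.flatMap (fun c => if c = p then new else [c]) := by
  unfold PySem.Chars.replace
  rw [if_neg (by simp)]
  exact pv_replace_go_single p new l l.length [] le_rfl

-- the three staged replaces of Source B rewrite each character by pvHp
lemma pv_repl3 (w : List Char) :
    PySem.Chars.replace
        (PySem.Chars.replace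
          (PySem.Chars.replace w [','] [' ', ','])
          ['.'] [' ', '.'])
        ['!'] [' ', '!']
      = w.flatMap pvHp := by
  simp only [pv_replace_single]
  induction w with
  | nil => simp
  | cons c w' ih =>
    simp only [List.flatMap_cons, List.flatMap_append, ih]
    congr 1
    by_cases h1 : c = ','
    · subst h1; simp [pvHp]
    · by_cases h2 : c = '.'
      · subst h2; simp [pvHp]
      · by_cases h3 : c = '!'
        · subst h3; simp [pvHp]
        · simp [pvHp, h1, h2, h3]

-- splitOn with separator " " is pvS
lemma pv_splitOn_go (l : List Char) :
    ∀ (fuel : Nat) (cur : List Char) (acc : List (List Char)), l.length ≤ fuel →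
      PySem.Chars.splitOn.go [' '] fuel l cur acc
        = acc.reverse ++ (pvS l).modifyHead (cur.reverse ++ ·) := by
  induction l with
  | nil =>
    intro fuel cur acc _
    cases fuel <;> simp [PySem.Chars.splitOn.go, pvS]
  | cons c rest ih =>
    intro fuel cur acc hf
    cases fuel with
    | zero => simp at hf
    | succ f =>
      by_cases hc : c = ' '
      · subst hc
        have hpre : [' '].isPrefixOf (' ' :: rest) = true := by simp [List.isPrefixOf]
        simp only [PySem.Chars.splitOn.go, hpre, if_true, List.length_cons,
          List.length_nil, Nat.zero_add, List.drop_succ_cons, List.drop_zero]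
        rw [ih f [] (cur.reverse :: acc) (by simp at hf; omega)]
        have hid : (pvS rest).modifyHead (([] : List Char).reverse ++ ·) = pvS rest := by
          cases h : pvS rest <;> simp [List.modifyHead]
        rw [hid]
        simp [pvS, List.modifyHead]
      · have hpre : [' '].isPrefixOf (c :: rest) = false := by
          simp [List.isPrefixOf]
          exact fun h => hc h.symm
        simp only [PySem.Chars.splitOn.go, hpre, Bool.false_eq_true, if_false]
        rw [ih f (c :: cur) acc (by simp at hf; omega)]
        have hmod : (pvS (c :: rest)).modifyHead (cur.reverse ++ ·)
            = (pvS rest).modifyHead ((c :: cur).reverse ++ ·) := by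
          simp only [pvS, if_neg hc]
          cases h : pvS rest <;> simp [List.modifyHead]
        rw [hmod]

lemma pv_splitOn_eq (l : List Char) : PySem.Chars.splitOn l [' '] = pvS l := by
  unfold PySem.Chars.splitOn
  rw [pv_splitOn_go l (l.length + 1) [] [] (by omega)]
  cases h : pvS l <;> simp [List.modifyHead]

lemma pv_pvS_ne_nil (l : List Char) : pvS l ≠ [] := by
  induction l with
  | nil => simp [pvS]
  | cons c l' ih =>
    simp only [pvS]
    split
    · simp
    · cases h : pvS l' with
      | nil => exact absurd h ih
      | cons a b => simp [List.modifyHead]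

-- join with " " of a nonempty token list
lemma pv_join_cons (w : List Char) (ws : List (List Char)) :
    PySem.Chars.join [' '] (w :: ws) = w ++ ws.flatMap (fun v => ' ' :: v) := by
  unfold PySem.Chars.join
  induction ws generalizing w with
  | nil => simp [List.intercalate]
  | cons v ws' ih =>
    have hstep : [' '].intercalate (w :: v :: ws') = w ++ ' ' :: [' '].intercalate (v :: ws') := by
      simp [List.intercalate, List.intersperse]
    rw [hstep, ih v]
    simp

lemma pv_K_map (ws : List (List Char)) :
    (ws.map pvTok).flatMap (fun v => ' ' :: v) = pvK ws := by
  simp [pvK, List.flatMap_map]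

lemma pv_G_space (l : List Char) : pvG ' ' l = pvF l := by
  cases l with
  | nil => rfl
  | cons c l' =>
    simp only [pvG, pvF]
    rw [if_neg (by simp)]
    rfl

-- the heart: the prev-tracking recursion equals split + per-token rewrite + join
lemma pv_main (l : List Char) :
    pvF l = PySem.Chars.join [' '] ((pvS l).map pvTok)
    ∧ ∀ p : Char, p ≠ ' ' →
        pvG p l = (pvS l).headI.flatMap pvHp ++ pvK (pvS l).tail := by
  induction l with
  | nil =>
    constructor
    · simp [pvF, pvS, pvTok, PySem.Chars.join, List.intercalate]
    · intro p _
      simp [pvG, pvS, pvK]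
  | cons c l' ih =>
    obtain ⟨w0, ws, hS⟩ : ∃ w0 ws, pvS l' = w0 :: ws := by
      cases h : pvS l' with
      | nil => exact absurd h (pv_pvS_ne_nil l')
      | cons a b => exact ⟨a, b, rfl⟩
    have hmainIH : pvF l' = pvTok w0 ++ pvK ws := by
      rw [ih.1, hS, List.map_cons, pv_join_cons, pv_K_map]
    by_cases hc : c = ' '
    · subst hc
      have hScons : pvS (' ' :: l') = [] :: pvS l' := by simp [pvS]
      have hLHS : pvF (' ' :: l') = ' ' :: pvF l' := by
        show ' ' :: pvG ' ' l' = _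
        rw [pv_G_space]
      constructor
      · rw [hLHS, hScons, List.map_cons, pv_join_cons, pv_K_map, hS, hmainIH]
        simp [pvTok, pvK]
      · intro p _
        have : pvG p (' ' :: l') = ' ' :: pvF l' := by
          simp only [pvG]
          rw [if_neg (by simp), pv_G_space]
          rfl
        rw [this, hScons, hS, hmainIH]
        simp [pvK]
    · have hScons : pvS (c :: l') = (c :: w0) :: ws := by
        simp [pvS, if_neg hc, hS, List.modifyHead]
      have hGc : pvG c l' = w0.flatMap pvHp ++ pvK ws := by
        have := ih.2 c hc
        rw [hS] at this
        simpa using this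
      have hTok : pvTok (c :: w0) = c :: w0.flatMap pvHp := by
        simp [pvTok]
      constructor
      · have hLHS : pvF (c :: l') = c :: pvG c l' := rfl
        rw [hLHS, hScons, List.map_cons, pv_join_cons, pv_K_map, hGc, hTok]
        simp
      · intro p hp
        rw [hScons]
        simp only [List.headI, List.tail]
        show (if (c = ',' ∨ c = '.' ∨ c = '!') ∧ p ≠ ' ' then [' ', c] else [c]) ++ pvG c l' = _
        rw [hGc]
        by_cases hpc : c = ',' ∨ c = '.' ∨ c = '!'
        · rw [if_pos ⟨hpc, hp⟩]
          simp [pvHp, hpc]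
        · rw [if_neg (fun h => hpc h.1)]
          simp only [List.flatMap_cons]
          rw [pvHp, if_neg hpc]
          simp

-- ===== VERDICT (by name: the statement is the Claim_ definition above) =====
set_option maxHeartbeats 1000000 in
theorem preprocess_nmt_spec : Claim_equal_preprocess_nmt := by
  intro text _
  unfold Spec_preprocess_nmt preprocess_nmt preprocess_nmt_alt
  simp only [PySem.Str.toList_lower]
  rw [pv_core]
  refine congrArg String.ofList ?_
  rw [pv_splitOn_eq]
  have hflat : ∀ (L : List Char), ((L.take 1) :: ((L.zip (L.drop 1)).map (fun pc : Char × Char =>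
      (if (pc.2 = ',' ∨ pc.2 = '.' ∨ pc.2 = '!') ∧ pc.1 ≠ ' ' then [' '] else []) ++ [pc.2]))).flatten = pvF L := by
    intro L
    cases L with
    | nil => simp [pvF]
    | cons a L' =>
      simp only [List.flatten_cons, List.take, List.drop, pv_zip_eq_G, pvF]
      rfl
  rw [hflat, (pv_main _).1]
  refine congrArg (PySem.Chars.join [' ']) ?_
  apply List.map_congr_left
  intro w _
  simp [pysem, pvTok]
  exact (pv_repl3 w.tail).symm
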